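-- pv_equiv track=rewrite | github.com/DavidGailleton/42-Piscine_Python | 06/alchemy/grimoire/validator.py | validate_ingredients
-- ===== SOURCE A (Python) =====
-- def validate_ingredients(ingredients: str) -> str:
--     try:
--         for ingredient in ingredients.split(" "):
--             if ingredient not in ["fire", "water", "earth", "air"]:
--                 raise ValueError
--         return f"{ingredients} - VALID"
--     except ValueError:
--         return f"{ingredients} - INVALID"
-- ===== SOURCE B (Python) =====
-- def validate_ingredients(ingredients: str) -> str:
--     # One fused character-level pass: tokenisation and validation streamed
--     # together with an accumulator; no split(), no exception control flow.
--     ok = True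
--     token = ""
--     for ch in ingredients + " ":
--         if ch == " ":
--             if token not in ("fire", "water", "earth", "air"):
--                 ok = False
--             token = ""
--         else:
--             token += ch
--     status = "VALID" if ok else "INVALID"
--     return f"{ingredients} - {status}"
-- ===== Notes on version B (the rewrite author's own statement) =====
-- stated objective: alternative
-- what changed: Replaced split-then-loop-with-sentinel-ValueError by a single fused character-level scan that streams tokenisation and validation together with a token accumulator and an ok flag, with no split() and no exception control flow.
import Mathlib
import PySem

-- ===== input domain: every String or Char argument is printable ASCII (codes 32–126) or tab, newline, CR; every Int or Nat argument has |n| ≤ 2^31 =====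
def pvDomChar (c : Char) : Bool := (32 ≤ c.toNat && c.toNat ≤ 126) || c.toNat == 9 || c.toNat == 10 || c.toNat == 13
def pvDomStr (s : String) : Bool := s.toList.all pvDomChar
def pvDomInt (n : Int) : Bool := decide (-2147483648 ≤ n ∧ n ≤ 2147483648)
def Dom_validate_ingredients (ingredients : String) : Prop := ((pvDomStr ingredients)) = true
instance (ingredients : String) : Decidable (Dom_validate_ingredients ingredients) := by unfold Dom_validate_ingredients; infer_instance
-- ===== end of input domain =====

-- B replaces A's split-then-loop with sentinel ValueError by one fused character-level
-- scan (token accumulator + ok flag), no split and no exception (objective: alternative).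

-- ===== PORT A =====
-- the for loop over the split tokens with the early 'raise ValueError' / except return
def pvLoopA (ingredients : String) : List String → String
  | [] => ingredients ++ " - VALID"
  | t :: ts =>
    if t ∈ ["fire", "water", "earth", "air"] then pvLoopA ingredients ts
    else ingredients ++ " - INVALID"

def validate_ingredients (ingredients : String) : String :=
  pvLoopA ingredients (((PySem.Str.split? ingredients " ").getD []))

-- ===== PORT B =====
-- one step of B's character loop; state = (ok, token)
def pvStepB (st : Bool × List Char) (ch : Char) : Bool × List Char :=
  if ch = ' ' then
    (if String.ofList st.2 ∈ ["fire", "water", "earth", "air"] then st.1 else false, [])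
  else (st.1, st.2 ++ [ch])

def validate_ingredients_alt (ingredients : String) : String :=
  let st := (ingredients ++ " ").toList.foldl pvStepB (true, ([] : List Char))
  let status := if st.1 then "VALID" else "INVALID"
  ingredients ++ " - " ++ status

-- ===== PRECONDITION & SPEC =====
def Spec_validate_ingredients (ingredients : String) (out : String) : Prop := out = validate_ingredients_alt ingredients
instance (ingredients : String) (out : String) : Decidable (Spec_validate_ingredients ingredients out) := by unfold Spec_validate_ingredients; infer_instance

-- ===== CLAIM (what is proved, stated in full; the proofs are below) =====
def Claim_equal_validate_ingredients : Prop := ∀ (ingredients : String), Dom_validate_ingredients ingredients → Spec_validate_ingredients ingredients (validate_ingredients ingredients)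

-- ===== LEMMAS AND PROOFS =====

-- reference tokenisation: split on ' ' with a running token accumulator
def pvToks : List Char → List Char → List (List Char)
  | tok, [] => [tok]
  | tok, c :: cs => if c = ' ' then tok :: pvToks [] cs else pvToks (tok ++ [c]) cs

def pvTokOk (t : List Char) : Bool :=
  decide (String.ofList t ∈ ["fire", "water", "earth", "air"])

-- A's splitOn.go produces exactly the accumulator-style tokens
lemma splitOn_go_eq_toks (fuel : Nat) (cs tok : List Char) (acc : List (List Char))
    (h : cs.length < fuel) :
    PySem.Chars.splitOn.go [' '] fuel cs tok.reverse acc = acc.reverse ++ pvToks tok cs := by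
  induction fuel generalizing cs tok acc with
  | zero => omega
  | succ fuel ih =>
    cases cs with
    | nil => simp [PySem.Chars.splitOn.go, pvToks]
    | cons c cs =>
      by_cases hc : c = ' '
      · subst hc
        have hpre : [' '].isPrefixOf (' ' :: cs) = true := by simp [List.isPrefixOf]
        have := ih cs [] (tok :: acc) (by simpa using Nat.lt_of_succ_lt_succ h)
        simp only [List.reverse_nil] at this
        simp [PySem.Chars.splitOn.go, hpre, pvToks, this]
      · have hpre : [' '].isPrefixOf (c :: cs) = false := by
          simp [List.isPrefixOf]; exact fun h' => hc h'.symm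
        have := ih cs (tok ++ [c]) acc (by simpa using Nat.lt_of_succ_lt_succ h)
        simp only [List.reverse_append, List.reverse_singleton, List.singleton_append] at this
        simp only [PySem.Chars.splitOn.go, hpre, Bool.false_eq_true, if_false]
        simpa [pvToks, hc] using this

-- B's fold over cs ++ [' '] computes validity of all tokens
lemma foldB_eq_all (cs : List Char) (ok : Bool) (tok : List Char) :
    (List.foldl pvStepB (ok, tok) (cs ++ [' '])).1 = (ok && (pvToks tok cs).all pvTokOk) := by
  induction cs generalizing ok tok with
  | nil =>
    by_cases h : String.ofList tok ∈ ["fire", "water", "earth", "air"] <;>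
      simp [pvStepB, pvToks, pvTokOk, h]
  | cons c cs ih =>
    by_cases hc : c = ' '
    · subst hc
      simp only [List.cons_append, List.foldl_cons]
      rw [show pvStepB (ok, tok) ' ' = (ok && pvTokOk tok, []) by
            by_cases h : String.ofList tok ∈ ["fire", "water", "earth", "air"] <;>
              simp [pvStepB, pvTokOk, h]]
      rw [ih]
      simp [pvToks, Bool.and_assoc]
    · simp only [List.cons_append, List.foldl_cons, pvStepB, hc]
      rw [ih]
      simp [pvToks, hc]

-- A's token loop is the 'all tokens allowed' test
lemma pvLoopA_eq_all (ing : String) (ts : List String) :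
    pvLoopA ing ts =
      ing ++ " - " ++
        (if ts.all (fun t => decide (t ∈ ["fire", "water", "earth", "air"])) then "VALID"
         else "INVALID") := by
  induction ts with
  | nil => simp [pvLoopA, String.append_assoc]
  | cons t ts ih =>
    by_cases h : t ∈ ["fire", "water", "earth", "air"]
    · simp only [pvLoopA, if_pos h, ih, List.all_cons, decide_eq_true h, Bool.true_and]
    · simp only [pvLoopA, if_neg h, List.all_cons, decide_eq_false h, Bool.false_and,
        Bool.false_eq_true, if_false, String.append_assoc]
      rfl

-- ===== VERDICT (by name: the statement is the Claim_ definition above) =====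
theorem validate_ingredients_spec : Claim_equal_validate_ingredients := by
  intro ing _
  unfold Spec_validate_ingredients validate_ingredients validate_ingredients_alt
  have hsplit : (PySem.Str.split? ing " ").getD [] =
      (PySem.Chars.splitOn ing.toList [' ']).map String.ofList := by
    simp [PySem.Str.split?, PySem.Chars.split?]
  have hgo : PySem.Chars.splitOn ing.toList [' '] = pvToks [] ing.toList := by
    have := splitOn_go_eq_toks (ing.toList.length + 1) ing.toList [] [] (by omega)
    simpa [PySem.Chars.splitOn] using this
  have hB : ((ing ++ " ").toList.foldl pvStepB (true, ([] : List Char))).1 =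
      (pvToks [] ing.toList).all pvTokOk := by
    have : (ing ++ " ").toList = ing.toList ++ [' '] := by
      simp
    rw [this, foldB_eq_all]
    simp
  rw [hsplit, hgo, pvLoopA_eq_all]
  simp only [hB, List.all_map]
  have hfun : ((fun t => decide (t ∈ ["fire", "water", "earth", "air"])) ∘ String.ofList) = pvTokOk := by
    funext t; simp [pvTokOk, Function.comp]
  rw [hfun]
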